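-- pv_equiv track=rewrite | github.com/Mykelo/kkd | 3lista/lzw.py | findNextEntry
-- ===== SOURCE A (Python) =====
-- def findNextEntry(dictionary, pointer, I):
--     expectedIndex = pointer
--     returnPointer = pointer
--     isFull = True
--     for _ in range(len(dictionary)):
--         pointer = (pointer + 1) % len(dictionary)
--         if dictionary[pointer]['parent'] == I and dictionary[pointer]['index'] == expectedIndex:
--             isFull = False
--             return True, pointer, isFull
--         elif dictionary[pointer]['index'] == -1:
--             returnPointer = pointer
--             isFull = False
--     return False, returnPointer, isFull
-- ===== SOURCE B (Python) =====
-- def findNextEntry(dictionary, pointer, I):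
--     n = len(dictionary)
--     order = [(pointer + k) % n for k in range(1, n + 1)]
--     for p in order:
--         if dictionary[p]['parent'] == I and dictionary[p]['index'] == pointer:
--             return True, p, False
--     for p in reversed(order):
--         if dictionary[p]['index'] == -1:
--             return False, p, False
--     return False, pointer, True
-- ===== Notes on version B (the rewrite author's own statement) =====
-- stated objective: alternative
-- what changed: B replaces A's single stateful sweep (mutating pointer, carrying returnPointer/isFull accumulators) with building the cyclic order list once, a first-match search over it for the entry, and, failing that, a back-to-front search of the same list for the last free (-1) slot.
-- outside the precondition, e.g. on findNextEntry([{'index': -1}], 0, 0): A raises KeyError, B raises KeyError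
import Mathlib
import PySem

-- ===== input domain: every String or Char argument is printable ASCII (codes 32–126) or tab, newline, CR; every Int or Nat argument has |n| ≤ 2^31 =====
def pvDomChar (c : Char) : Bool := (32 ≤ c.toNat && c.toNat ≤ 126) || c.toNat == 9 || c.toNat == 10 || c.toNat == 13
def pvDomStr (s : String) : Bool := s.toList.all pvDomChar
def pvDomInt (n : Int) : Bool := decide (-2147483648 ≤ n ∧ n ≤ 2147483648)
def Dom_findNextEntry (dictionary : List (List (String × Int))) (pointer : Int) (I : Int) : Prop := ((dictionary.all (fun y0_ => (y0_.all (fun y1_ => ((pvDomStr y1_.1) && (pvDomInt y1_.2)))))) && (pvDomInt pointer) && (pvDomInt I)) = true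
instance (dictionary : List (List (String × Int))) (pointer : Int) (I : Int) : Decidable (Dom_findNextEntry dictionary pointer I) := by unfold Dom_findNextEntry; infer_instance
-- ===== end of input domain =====

-- B builds the cyclic order list once and does a first-match search over it, then a back-to-front
-- search for the last free (-1) slot, instead of A's single stateful sweep; same cost (alternative).
-- dictionary[p]['key'] in both Pythons: the slot index is always in range when accessed; Pre_
-- guarantees the keys "parent"/"index" are present, so the .getD defaults are never the value used.
def fieldAt (d : List (List (String × Int))) (p : Int) (k : String) : Int :=
  ((PySem.Dict.ofList ((PySem.List.pyGet? d p).getD [])).get? k).getD 0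

-- ===== PORT A =====
def loopA (d : List (List (String × Int))) (expectedIndex I : Int) :
    Nat → Int → Int → Bool → Bool × Int × Bool
  | 0, _, returnPointer, isFull => (false, returnPointer, isFull)
  | Nat.succ k, ptr, returnPointer, isFull =>
    let p := PySem.Int.mod (ptr + 1) (d.length : Int)
    if fieldAt d p "parent" == I && fieldAt d p "index" == expectedIndex then
      (true, p, false)
    else if fieldAt d p "index" == (-1 : Int) then
      loopA d expectedIndex I k p p false
    else
      loopA d expectedIndex I k p returnPointer isFull

def findNextEntry (dictionary : List (List (String × Int))) (pointer : Int) (I : Int) : Bool × Int × Bool :=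
  loopA dictionary pointer I dictionary.length pointer pointer true

-- ===== PORT B =====
def findNextEntry_alt (dictionary : List (List (String × Int))) (pointer : Int) (I : Int) : Bool × Int × Bool :=
  let n : Int := dictionary.length
  let order := (PySem.List.pyRange 1 (n + 1) 1).map (fun k => PySem.Int.mod (pointer + k) n)
  match order.find? (fun p => fieldAt dictionary p "parent" == I && fieldAt dictionary p "index" == pointer) with
  | some p => (true, p, false)
  | none =>
    match order.reverse.find? (fun p => fieldAt dictionary p "index" == (-1 : Int)) with
    | some p => (false, p, false)
    | none => (false, pointer, true)

-- ===== PRECONDITION & SPEC =====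
-- Pre_ excludes dictionaries with a slot missing the "parent" or "index" key, on which Python A raises KeyError.
def Pre_findNextEntry (dictionary : List (List (String × Int))) (pointer : Int) (I : Int) : Prop :=
  ∀ e ∈ dictionary, (((PySem.Dict.ofList e).get? "parent").isSome && ((PySem.Dict.ofList e).get? "index").isSome) = true
instance (dictionary : List (List (String × Int))) (pointer : Int) (I : Int) : Decidable (Pre_findNextEntry dictionary pointer I) := by unfold Pre_findNextEntry; infer_instance

def pvWitness_findNextEntry : (List (List (String × Int))) × Int × Int :=
  ([[("parent", 0), ("index", -1)], [("parent", 1), ("index", 0)]], 0, 1)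

def Spec_findNextEntry (dictionary : List (List (String × Int))) (pointer : Int) (I : Int) (out : Bool × Int × Bool) : Prop := out = findNextEntry_alt dictionary pointer I
instance (dictionary : List (List (String × Int))) (pointer : Int) (I : Int) (out : Bool × Int × Bool) : Decidable (Spec_findNextEntry dictionary pointer I out) := by unfold Spec_findNextEntry; infer_instance

-- ===== CLAIM (what is proved, stated in full; the proofs are below) =====
def Claim_equal_findNextEntry : Prop := ∀ (dictionary : List (List (String × Int))) (pointer : Int) (I : Int), Dom_findNextEntry dictionary pointer I → Pre_findNextEntry dictionary pointer I → Spec_findNextEntry dictionary pointer I (findNextEntry dictionary pointer I)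

-- ===== LEMMAS AND PROOFS =====

-- A's loop abstracted over the (already computed) list of slot positions it visits.
def loopL (d : List (List (String × Int))) (expectedIndex I : Int) :
    List Int → Int → Bool → Bool × Int × Bool
  | [], returnPointer, isFull => (false, returnPointer, isFull)
  | p :: ps, returnPointer, isFull =>
    if fieldAt d p "parent" == I && fieldAt d p "index" == expectedIndex then
      (true, p, false)
    else if fieldAt d p "index" == (-1 : Int) then
      loopL d expectedIndex I ps p false
    else
      loopL d expectedIndex I ps returnPointer isFull

-- the successive positions A's mutating pointer takes
def chain (n : Int) : Nat → Int → List Int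
  | 0, _ => []
  | Nat.succ k, ptr =>
    let p := PySem.Int.mod (ptr + 1) n
    p :: chain n k p

theorem loopA_eq_loopL (d : List (List (String × Int))) (exp I : Int) (k : Nat) (ptr rp : Int) (full : Bool) :
    loopA d exp I k ptr rp full = loopL d exp I (chain (d.length : Int) k ptr) rp full := by
  induction k generalizing ptr rp full with
  | zero => rfl
  | succ k ih =>
    simp only [loopA, loopL, chain]
    split_ifs <;> simp [ih]

theorem chain_closed (n : Int) (hn : 0 < n) (k : Nat) (ptr : Int) :
    chain n k ptr = (List.range k).map (fun (j : Nat) => PySem.Int.mod (ptr + (j : Int) + 1) n) := by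
  induction k generalizing ptr with
  | zero => rfl
  | succ k ih =>
    rw [List.range_succ_eq_map, List.map_cons, List.map_map]
    simp only [chain]
    congr 1
    · simp
    · rw [ih]
      apply List.map_congr_left
      intro j _
      simp only [Function.comp_apply]
      rw [PySem.Int.mod_eq_emod_of_pos hn, PySem.Int.mod_eq_emod_of_pos hn,
          PySem.Int.mod_eq_emod_of_pos hn, add_assoc, Int.emod_add_emod]
      push_cast
      ring_nf

theorem pyRange_one_to_range (m : Nat) :
    PySem.List.pyRange 1 ((m : Int) + 1) 1 = (List.range m).map (fun (j : Nat) => (j : Int) + 1) := by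
  induction m with
  | zero => rfl
  | succ m ih =>
    push_cast
    rw [PySem.List.pyRange_one_succ_right (by omega), ih, List.range_succ, List.map_append]
    simp

-- B's order list is exactly the list of positions A visits.
theorem order_eq_chain (d : List (List (String × Int))) (pointer : Int) (hd : d ≠ []) :
    ((PySem.List.pyRange 1 ((d.length : Int) + 1) 1).map
        (fun k => PySem.Int.mod (pointer + k) (d.length : Int)))
      = chain (d.length : Int) d.length pointer := by
  have hn : (0 : Int) < (d.length : Int) := by
    have := List.length_pos_iff.mpr hd; exact_mod_cast this
  rw [chain_closed _ hn, pyRange_one_to_range, List.map_map]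
  apply List.map_congr_left
  intro j _
  simp only [Function.comp_apply]
  ring_nf

-- The list-level loop is the first-match search, else the back-to-front free-slot search.
theorem loopL_eq_searches (d : List (List (String × Int))) (exp I : Int) (ps : List Int)
    (rp : Int) (full : Bool) :
    loopL d exp I ps rp full =
      match ps.find? (fun p => fieldAt d p "parent" == I && fieldAt d p "index" == exp) with
      | some p => (true, p, false)
      | none =>
        match ps.reverse.find? (fun p => fieldAt d p "index" == (-1 : Int)) with
        | some p => (false, p, false)
        | none => (false, rp, full) := by
  induction ps generalizing rp full with
  | nil => rfl
  | cons p ps ih =>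
    rw [List.reverse_cons, List.find?_append]
    by_cases hm : (fieldAt d p "parent" == I && fieldAt d p "index" == exp) = true
    · rw [List.find?_cons_of_pos (p := fun q => fieldAt d q "parent" == I && fieldAt d q "index" == exp) (l := ps) hm]
      simp [loopL, hm]
    · rw [List.find?_cons_of_neg (p := fun q => fieldAt d q "parent" == I && fieldAt d q "index" == exp) (l := ps) hm]
      by_cases hf : (fieldAt d p "index" == (-1 : Int)) = true
      · have hl : loopL d exp I (p :: ps) rp full = loopL d exp I ps p false := by
          simp [loopL, hm, hf]
        have h1 : List.find? (fun q => fieldAt d q "index" == (-1 : Int)) [p] = some p := by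
          simp [List.find?, hf]
        rw [hl, ih, h1]
        cases hfind : List.find? (fun q => fieldAt d q "parent" == I && fieldAt d q "index" == exp) ps with
        | some q => rfl
        | none =>
          cases hrev : List.find? (fun q => fieldAt d q "index" == (-1 : Int)) ps.reverse with
          | some q => rfl
          | none => rfl
      · have hl : loopL d exp I (p :: ps) rp full = loopL d exp I ps rp full := by
          simp [loopL, hm, hf]
        have h1 : List.find? (fun q => fieldAt d q "index" == (-1 : Int)) [p] = none := by
          simp [List.find?, hf]
        rw [hl, ih, h1]
        cases hfind : List.find? (fun q => fieldAt d q "parent" == I && fieldAt d q "index" == exp) ps with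
        | some q => rfl
        | none =>
          cases hrev : List.find? (fun q => fieldAt d q "index" == (-1 : Int)) ps.reverse with
          | some q => rfl
          | none => rfl

-- ===== VERDICT (by name: the statement is the Claim_ definition above) =====
theorem findNextEntry_spec : Claim_equal_findNextEntry := by
  intro dictionary pointer I _ _
  unfold Spec_findNextEntry findNextEntry findNextEntry_alt
  cases hd : dictionary with
  | nil => rfl
  | cons e es =>
    rw [← hd]
    have hne : dictionary ≠ [] := by rw [hd]; exact List.cons_ne_nil _ _
    rw [loopA_eq_loopL, ← order_eq_chain dictionary pointer hne, loopL_eq_searches]
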